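-- pv_equiv track=rewrite | github.com/tborrman/DNA-rep | figure2_bed.py | filter_red_labels
-- ===== SOURCE A (Python) =====
-- def filter_red_labels(red_labels):
-- 	'''
-- 	Get index of red labels to keep
-- 	'''
-- 	idx_to_keep = []
-- 	for idx in range(len(red_labels)):
-- 		total_neighbors = 0
-- 		test_label = red_labels[idx]
-- 		for query_label in red_labels:
-- 			if abs(test_label - query_label) < 50000 :
-- 				total_neighbors +=1
-- 		if total_neighbors > 4:
-- 			idx_to_keep.append(idx)
-- 	return idx_to_keep
-- ===== SOURCE B (Python) =====
-- def _bisect_left(a, x):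
-- 	lo = 0
-- 	hi = len(a)
-- 	while lo < hi:
-- 		mid = (lo + hi) // 2
-- 		if a[mid] < x:
-- 			lo = mid + 1
-- 		else:
-- 			hi = mid
-- 	return lo
--
-- def _bisect_right(a, x):
-- 	lo = 0
-- 	hi = len(a)
-- 	while lo < hi:
-- 		mid = (lo + hi) // 2
-- 		if x < a[mid]:
-- 			hi = mid
-- 		else:
-- 			lo = mid + 1
-- 	return lo
--
-- def filter_red_labels(red_labels):
-- 	'''
-- 	Get index of red labels to keep
-- 	'''
-- 	ss = sorted(red_labels)
-- 	idx_to_keep = []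
-- 	for idx, x in enumerate(red_labels):
-- 		cnt = _bisect_left(ss, x + 50000) - _bisect_right(ss, x - 50000)
-- 		if cnt > 4:
-- 			idx_to_keep.append(idx)
-- 	return idx_to_keep
-- ===== Notes on version B (the rewrite author's own statement) =====
-- stated objective: faster
-- what changed: Replaces the quadratic all-pairs neighbor count with one sort plus two hand-written binary searches per element (count = bisect_left(ss, x+50000) - bisect_right(ss, x-50000)).
import Mathlib
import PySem

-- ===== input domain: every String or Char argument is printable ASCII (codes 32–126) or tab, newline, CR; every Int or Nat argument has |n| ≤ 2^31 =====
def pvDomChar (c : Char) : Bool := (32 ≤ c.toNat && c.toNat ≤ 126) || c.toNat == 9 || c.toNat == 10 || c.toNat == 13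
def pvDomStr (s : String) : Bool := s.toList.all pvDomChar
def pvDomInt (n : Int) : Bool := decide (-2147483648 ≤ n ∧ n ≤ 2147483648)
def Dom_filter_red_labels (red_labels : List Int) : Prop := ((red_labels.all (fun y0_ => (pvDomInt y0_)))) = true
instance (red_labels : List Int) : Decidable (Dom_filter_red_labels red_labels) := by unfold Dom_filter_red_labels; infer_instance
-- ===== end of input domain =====

-- B replaces A's O(n^2) all-pairs neighbor count with sort + two binary searches per element (O(n log n)).

-- ===== PORT A =====
-- inner loop: 'for query_label in red_labels: if abs(test_label - query_label) < 50000: total_neighbors += 1'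
def pyNeighborCount (red_labels : List Int) (test_label : Int) : Int :=
  red_labels.foldl (fun total q => if |test_label - q| < 50000 then total + 1 else total) 0

def filter_red_labels (red_labels : List Int) : List Int :=
  (PySem.List.pyRange 0 red_labels.length).foldl
    (fun idx_to_keep idx =>
      -- red_labels[idx]: idx ∈ range(len(red_labels)) is always in range, so pyGetD is exact here
      let test_label := PySem.List.pyGetD red_labels idx 0
      if 4 < pyNeighborCount red_labels test_label then idx_to_keep ++ [idx] else idx_to_keep)
    []

-- ===== PORT B =====
-- Source B's _bisect_left/_bisect_right are the standard binary-search while loops, literally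
-- PySem.List.bisectLeft/bisectRight's loop (same lo/hi/mid updates), so we cite those.
def bWindowCount (ss : List Int) (x : Int) : Int :=
  (PySem.List.bisectLeft ss (x + 50000) : Int) - (PySem.List.bisectRight ss (x - 50000) : Int)

def filter_red_labels_alt (red_labels : List Int) : List Int :=
  let ss := PySem.List.sorted red_labels (fun v => v)
  (PySem.List.enumerate red_labels).foldl
    (fun idx_to_keep p =>
      if 4 < bWindowCount ss p.2 then idx_to_keep ++ [p.1] else idx_to_keep)
    []

-- ===== PRECONDITION & SPEC =====
def Spec_filter_red_labels (red_labels : List Int) (out : List Int) : Prop := out = filter_red_labels_alt red_labels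
instance (red_labels : List Int) (out : List Int) : Decidable (Spec_filter_red_labels red_labels out) := by unfold Spec_filter_red_labels; infer_instance

-- ===== CLAIM (what is proved, stated in full; the proofs are below) =====
def Claim_equal_filter_red_labels : Prop := ∀ (red_labels : List Int), Dom_filter_red_labels red_labels → Spec_filter_red_labels red_labels (filter_red_labels red_labels)

-- ===== LEMMAS AND PROOFS =====

-- on a list split at position r by a predicate, countP is the split point
theorem countP_eq_of_split (p : Int → Bool) :
    ∀ (ss : List Int) (r : Nat), r ≤ ss.length →
      (∀ j (hj : j < ss.length), j < r → p ss[j] = true) →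
      (∀ j (hj : j < ss.length), r ≤ j → p ss[j] = false) →
      ss.countP p = r := by
  intro ss
  induction ss with
  | nil => intro r hr _ _; simpa using (Nat.le_zero.mp hr).symm
  | cons a t ih =>
    intro r hr h1 h2
    cases r with
    | zero =>
      have ha : p a = false := h2 0 (by simp) (by omega)
      have ht : t.countP p = 0 := by
        apply ih 0 (by omega)
        · intro j hj hlt; omega
        · intro j hj _
          have := h2 (j + 1) (by simpa using Nat.succ_lt_succ hj) (by omega)
          simpa using this
      simp [ha, ht]
    | succ r' =>
      have ha : p a = true := h1 0 (by simp) (by omega)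
      have ht : t.countP p = r' := by
        apply ih r' (by simpa using hr)
        · intro j hj hlt
          have := h1 (j + 1) (by simpa using Nat.succ_lt_succ hj) (by omega)
          simpa using this
        · intro j hj hge
          have := h2 (j + 1) (by simpa using Nat.succ_lt_succ hj) (by omega)
          simpa using this
      simp [ha, ht]

theorem bisectLeft_eq_countP (ss : List Int) (x : Int)
    (hs : List.Pairwise (fun a b : Int => a ≤ b) ss) :
    PySem.List.bisectLeft ss x = ss.countP (fun q => decide (q < x)) := by
  obtain ⟨hle, hlt, hge⟩ := PySem.List.bisectLeft_spec ss x hs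
  symm
  apply countP_eq_of_split _ ss _ hle
  · intro j hj hlt'; simpa using hlt j hj hlt'
  · intro j hj hge'; simpa using not_lt.mpr (hge j hj hge')

theorem bisectRight_eq_countP (ss : List Int) (x : Int)
    (hs : List.Pairwise (fun a b : Int => a ≤ b) ss) :
    PySem.List.bisectRight ss x = ss.countP (fun q => decide (q ≤ x)) := by
  obtain ⟨hle, hlt, hge⟩ := PySem.List.bisectRight_spec ss x hs
  symm
  apply countP_eq_of_split _ ss _ hle
  · intro j hj hlt'; simpa using hlt j hj hlt'
  · intro j hj hge'; simpa using not_le.mpr (hge j hj hge')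

-- counting q < x+50000 splits into the window count plus the count of q ≤ x-50000
theorem countP_window_split (x : Int) (l : List Int) :
    l.countP (fun q => decide (q < x + 50000))
      = l.countP (fun q => decide (|x - q| < 50000)) + l.countP (fun q => decide (q ≤ x - 50000)) := by
  induction l with
  | nil => simp
  | cons a t ih =>
    have hw : (decide (|x - a| < 50000)) = (decide (-50000 < x - a ∧ x - a < 50000)) :=
      decide_eq_decide.mpr abs_lt
    simp only [List.countP_cons, ih, hw, decide_eq_true_eq]
    split_ifs <;> omega

-- the counts agree for every test value
theorem count_eq (red_labels : List Int) (x : Int) :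
    pyNeighborCount red_labels x
      = bWindowCount (PySem.List.sorted red_labels (fun v => v)) x := by
  have hperm := PySem.List.sorted_perm red_labels (fun v => v) false
  have hpair : List.Pairwise (fun a b : Int => a ≤ b)
      (PySem.List.sorted red_labels (fun v => v)) := by
    simpa using PySem.List.sorted_pairwise red_labels (fun v => v)
  unfold pyNeighborCount bWindowCount
  rw [PySem.List.foldl_ite_add_one (p := fun q => |x - q| < 50000)]
  rw [bisectLeft_eq_countP _ _ hpair, bisectRight_eq_countP _ _ hpair]
  have hsplit := countP_window_split x (PySem.List.sorted red_labels (fun v => v))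
  have hA := hperm.countP_eq (fun q => decide (|x - q| < 50000))
  rw [← hA]
  omega

-- both filtered index lists coincide, for any predicate on the values
theorem enum_map_eq (C : Int → Prop) [DecidablePred C] :
    ∀ (l : List Int) (k : Nat),
      List.map Prod.fst
          (List.filter (fun p : Int × Int => decide (C p.2)) (PySem.List.enumerate l (k : Int)))
        = List.map (fun i : Nat => ((k + i : Nat) : Int))
            (List.filter (fun i => decide (C (l.getD i 0))) (List.range l.length)) := by
  intro l
  induction l with
  | nil => intro k; simp [PySem.List.enumerate]
  | cons a t ih =>
    intro k
    have hk : (k : Int) + 1 = ((k + 1 : Nat) : Int) := by push_cast; ring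
    have htail : List.map Prod.fst
        (List.filter (fun p : Int × Int => decide (C p.2)) (PySem.List.enumerate t ((k : Int) + 1)))
        = List.map (fun x : Nat => (k : Int) + ((x : Int) + 1))
            (List.filter (fun x => decide (C (t[x]?.getD 0))) (List.range t.length)) := by
      rw [hk, ih (k + 1)]
      simp only [List.getD_eq_getElem?_getD]
      apply List.map_congr_left
      intro i _
      push_cast
      ring
    rw [show PySem.List.enumerate (a :: t) (k : Int)
        = ((k : Int), a) :: PySem.List.enumerate t ((k : Int) + 1) from rfl]
    simp only [List.length_cons, List.range_succ_eq_map, List.filter_cons, List.getD_cons_zero]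
    by_cases hc : C a <;>
      · simp [hc, List.filter_map, List.map_map, Function.comp_def]
        exact htail

-- ===== VERDICT (by name: the statement is the Claim_ definition above) =====
theorem filter_red_labels_spec : Claim_equal_filter_red_labels := by
  intro red_labels _
  unfold Spec_filter_red_labels filter_red_labels filter_red_labels_alt
  rw [PySem.List.foldl_append_ite
    (p := fun idx => 4 < pyNeighborCount red_labels (PySem.List.pyGetD red_labels idx 0))
    (f := fun idx => idx)]
  rw [PySem.List.foldl_append_ite
    (p := fun p : Int × Int => 4 < bWindowCount (PySem.List.sorted red_labels (fun v => v)) p.2)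
    (f := fun p : Int × Int => p.1)]
  simp only [List.nil_append, List.map_id']
  have hB := enum_map_eq
    (fun x => 4 < bWindowCount (PySem.List.sorted red_labels (fun v => v)) x) red_labels 0
  simp only [Nat.cast_zero, Nat.zero_add] at hB
  rw [hB, PySem.List.pyRange_zero_natCast, List.filter_map]
  congr 1
  apply List.filter_congr
  intro i _
  simp only [Function.comp_def, PySem.List.pyGetD_natCast]
  rw [count_eq]
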